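-- pv_equiv track=rewrite | github.com/sgrizzo/AVA-AI-Voice-Agent-for-Asterisk | local_ai_server/server.py | _strip_leading_bos
-- ===== SOURCE A (Python) =====
-- def _strip_leading_bos(prompt: str) -> str:
--     if not prompt:
--         return prompt
--     cleaned = prompt.lstrip()
--     for marker in ("<s>", "<|bos|>"):
--         while cleaned.startswith(marker):
--             cleaned = cleaned[len(marker):].lstrip()
--     return cleaned
-- ===== SOURCE B (Python) =====
-- def _strip_leading_bos(prompt: str) -> str:
--     # Single index scan: advance a cursor past leading whitespace and marker
--     # runs, then slice once at the end (A re-slices the string repeatedly).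
--     if not prompt:
--         return prompt
--     n = len(prompt)
--     i = 0
--     while i < n and prompt[i].isspace():
--         i += 1
--     for marker in ("<s>", "<|bos|>"):
--         m = len(marker)
--         while prompt.startswith(marker, i):
--             i += m
--             while i < n and prompt[i].isspace():
--                 i += 1
--     return prompt[i:]
-- ===== Notes on version B (the rewrite author's own statement) =====
-- stated objective: alternative
-- what changed: Replaces A's repeated slice-and-lstrip rebuilding of the string with a single integer cursor advanced past whitespace and marker runs, slicing the original string exactly once at the end.
import Mathlib
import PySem

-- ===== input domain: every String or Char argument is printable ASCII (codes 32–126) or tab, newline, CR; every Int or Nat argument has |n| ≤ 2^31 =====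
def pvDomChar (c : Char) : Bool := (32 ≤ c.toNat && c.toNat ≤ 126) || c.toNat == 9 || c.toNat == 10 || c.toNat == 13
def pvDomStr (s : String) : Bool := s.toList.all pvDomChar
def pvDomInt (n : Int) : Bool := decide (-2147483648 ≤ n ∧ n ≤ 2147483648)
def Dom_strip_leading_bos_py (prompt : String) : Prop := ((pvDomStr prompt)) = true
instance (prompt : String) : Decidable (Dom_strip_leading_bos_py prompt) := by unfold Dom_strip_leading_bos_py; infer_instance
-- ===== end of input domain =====

-- B replaces A's repeated slice-and-lstrip string rebuilding by a single integer
-- cursor over the original string, sliced once at the end (alternative, same result).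


-- ===== PORT A =====
-- A's inner `while cleaned.startswith(marker): cleaned = cleaned[len(marker):].lstrip()`
def pvStripLoopA (marker : List Char) (hm : marker ≠ []) (cleaned : List Char) : List Char :=
  if h : PySem.Chars.startswith cleaned marker = true then
    pvStripLoopA marker hm (PySem.Chars.lstrip (cleaned.drop marker.length))
  else cleaned
termination_by cleaned.length
decreasing_by
  have hp : marker <+: cleaned := (PySem.Chars.startswith_iff _ _).mp h
  have hlen : marker.length ≤ cleaned.length := hp.length_le
  have h0 : 0 < marker.length := List.length_pos_iff.mpr hm
  have h1 : (PySem.Chars.lstrip (cleaned.drop marker.length)).length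
      ≤ (cleaned.drop marker.length).length := List.length_dropWhile_le _ _
  have h2 : (cleaned.drop marker.length).length = cleaned.length - marker.length :=
    List.length_drop ..
  omega

def strip_leading_bos_py (prompt : String) : String :=
  if prompt.toList = [] then prompt
  else
    let cleaned := PySem.Chars.lstrip prompt.toList
    let cleaned := pvStripLoopA "<s>".toList (by decide) cleaned
    let cleaned := pvStripLoopA "<|bos|>".toList (by decide) cleaned
    String.ofList cleaned

-- ===== PORT B =====
-- B's `while i < n and prompt[i].isspace(): i += 1` (returns the advanced cursor)
def pvWsAdv (s : List Char) (i : Nat) : Nat :=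
  if h : i < s.length then
    if PySem.Chars.isspace s[i] then pvWsAdv s (i + 1) else i
  else i
termination_by s.length - i

theorem pvWsAdv_le (s : List Char) (i : Nat) : i ≤ pvWsAdv s i := by
  fun_induction pvWsAdv s i with
  | case1 i h hs ih => omega
  | case2 i h hs => omega
  | case3 i h => omega

-- B's `while prompt.startswith(marker, i): i += m; <whitespace loop>`
def pvScanLoopB (s marker : List Char) (hm : marker ≠ []) (i : Nat) : Nat :=
  if h : PySem.Chars.startswith (s.drop i) marker = true then
    pvScanLoopB s marker hm (pvWsAdv s (i + marker.length))
  else i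
termination_by s.length - i
decreasing_by
  have hp : marker <+: s.drop i := (PySem.Chars.startswith_iff _ _).mp h
  have hlen : marker.length ≤ (s.drop i).length := hp.length_le
  have h0 : 0 < marker.length := List.length_pos_iff.mpr hm
  have hadv := pvWsAdv_le s (i + marker.length)
  have h2 : (s.drop i).length = s.length - i := List.length_drop ..
  omega

def strip_leading_bos_py_alt (prompt : String) : String :=
  if prompt.toList = [] then prompt
  else
    let s := prompt.toList
    let i := pvWsAdv s 0
    let i := pvScanLoopB s "<s>".toList (by decide) i
    let i := pvScanLoopB s "<|bos|>".toList (by decide) i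
    String.ofList (s.drop i)

-- ===== PRECONDITION & SPEC =====
def Spec_strip_leading_bos_py (prompt : String) (out : String) : Prop := out = strip_leading_bos_py_alt prompt
instance (prompt : String) (out : String) : Decidable (Spec_strip_leading_bos_py prompt out) := by unfold Spec_strip_leading_bos_py; infer_instance

-- ===== CLAIM (what is proved, stated in full; the proofs are below) =====
def Claim_equal_strip_leading_bos_py : Prop := ∀ (prompt : String), Dom_strip_leading_bos_py prompt → Spec_strip_leading_bos_py prompt (strip_leading_bos_py prompt)

-- ===== LEMMAS AND PROOFS =====

-- the cursor whitespace loop computes lstrip of the remaining suffix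
theorem drop_pvWsAdv (s : List Char) (i : Nat) :
    s.drop (pvWsAdv s i) = PySem.Chars.lstrip (s.drop i) := by
  fun_induction pvWsAdv s i with
  | case1 i h hs ih =>
      rw [ih, List.drop_eq_getElem_cons h,
        PySem.Chars.lstrip, PySem.Chars.lstrip, List.dropWhile_cons_of_pos hs]
  | case2 i h hs =>
      rw [List.drop_eq_getElem_cons h,
        PySem.Chars.lstrip, List.dropWhile_cons_of_neg (by simp [hs])]
  | case3 i h =>
      rw [List.drop_eq_nil_of_le (by omega)]
      rfl

-- the cursor marker loop computes A's slice-and-lstrip loop on the remaining suffix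
theorem drop_pvScanLoopB (s marker : List Char) (hm : marker ≠ []) (i : Nat) :
    s.drop (pvScanLoopB s marker hm i) = pvStripLoopA marker hm (s.drop i) := by
  fun_induction pvScanLoopB s marker hm i with
  | case1 i h ih =>
      conv_rhs => rw [pvStripLoopA]
      rw [dif_pos h, ih, drop_pvWsAdv, List.drop_drop]
  | case2 i h =>
      conv_rhs => rw [pvStripLoopA]
      rw [dif_neg h]

-- ===== VERDICT (by name: the statement is the Claim_ definition above) =====
theorem strip_leading_bos_py_spec : Claim_equal_strip_leading_bos_py := by
  intro prompt _
  unfold Spec_strip_leading_bos_py strip_leading_bos_py strip_leading_bos_py_alt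
  by_cases he : prompt.toList = []
  · simp [he]
  · simp only [he, if_false]
    rw [drop_pvScanLoopB, drop_pvScanLoopB, drop_pvWsAdv, List.drop_zero]
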